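-- pv_equiv track=rewrite | github.com/TensorSpeech/TensorFlowTTS | tensorflow_tts/processor/experiment/example_processor.py | clean_g2p
-- ===== SOURCE A (Python) =====
-- def clean_g2p(g2p_text: list):
--     data = []
--     for i, txt in enumerate(g2p_text):
--         if i == len(g2p_text) - 1:
--             if txt != " " and txt != "SIL":
--                 data.append("@" + txt)
--             else:
--                 data.append(
--                     "@END"
--                 )  # TODO try learning without end token and compare results
--             break
--         data.append("@" + txt) if txt != " " else data.append(
--             "@SIL"
--         )  # TODO change it in inference
--     return data
-- ===== SOURCE B (Python) =====
-- def clean_g2p(g2p_text: list):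
--     rev = g2p_text[::-1]
--     if not rev:
--         return []
--     out = ["@END" if rev[0] in (" ", "SIL") else "@" + rev[0]]
--     for t in rev[1:]:
--         out.append("@SIL" if t == " " else "@" + t)
--     out.reverse()
--     return out
-- ===== Notes on version B (the rewrite author's own statement) =====
-- stated objective: alternative
-- what changed: Instead of A's forward indexed loop with an in-loop last-index test and break, B reverses the input, handles the end token first as the head of the reversed list, builds the result back-to-front with no index bookkeeping, and reverses once at the end.
import Mathlib
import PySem

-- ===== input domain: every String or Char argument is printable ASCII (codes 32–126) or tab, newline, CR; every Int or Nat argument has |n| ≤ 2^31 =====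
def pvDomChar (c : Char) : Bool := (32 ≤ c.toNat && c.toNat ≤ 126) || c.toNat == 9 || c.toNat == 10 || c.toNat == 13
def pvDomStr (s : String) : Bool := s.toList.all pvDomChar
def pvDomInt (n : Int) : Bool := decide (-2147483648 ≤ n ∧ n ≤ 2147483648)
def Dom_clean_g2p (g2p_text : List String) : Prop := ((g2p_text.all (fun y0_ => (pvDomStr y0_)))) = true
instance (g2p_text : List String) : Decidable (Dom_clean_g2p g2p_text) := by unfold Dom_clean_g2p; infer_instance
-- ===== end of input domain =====

-- B replaces A's forward indexed loop (with in-loop last-index test and break) by a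
-- back-to-front build over the reversed list, reversed once at the end; objective: alternative.


-- ===== PORT A =====
-- A's loop over enumerate(g2p_text) with the i == len-1 special case and break,
-- rendered as structural recursion carrying the running index i and the total length n.
def clean_g2p_go (i n : Nat) : List String → List String
  | [] => []
  | txt :: rest =>
    if i = n - 1 then
      [if txt ≠ " " ∧ txt ≠ "SIL" then "@" ++ txt else "@END"]
    else
      (if txt ≠ " " then "@" ++ txt else "@SIL") :: clean_g2p_go (i + 1) n rest

def clean_g2p (g2p_text : List String) : List String :=
  clean_g2p_go 0 g2p_text.length g2p_text

-- ===== PORT B =====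
-- B: reverse the input; the end token is now the head and is mapped first; the remaining
-- tokens are appended back-to-front; one final reverse restores the original order.
def clean_g2p_alt (g2p_text : List String) : List String :=
  match g2p_text.reverse with
  | [] => []
  | lastTok :: rest =>
    ((if lastTok = " " ∨ lastTok = "SIL" then "@END" else "@" ++ lastTok) ::
      rest.map (fun t => if t = " " then "@SIL" else "@" ++ t)).reverse

-- ===== PRECONDITION & SPEC =====
def Spec_clean_g2p (g2p_text : List String) (out : List String) : Prop := out = clean_g2p_alt g2p_text
instance (g2p_text : List String) (out : List String) : Decidable (Spec_clean_g2p g2p_text out) := by unfold Spec_clean_g2p; infer_instance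

-- ===== CLAIM (what is proved, stated in full; the proofs are below) =====
def Claim_equal_clean_g2p : Prop := ∀ (g2p_text : List String), Dom_clean_g2p g2p_text → Spec_clean_g2p g2p_text (clean_g2p g2p_text)

-- ===== LEMMAS AND PROOFS =====

-- B on l ++ [x] is the per-token map on l followed by the mapped end token.
theorem clean_g2p_alt_concat (l : List String) (x : String) :
    clean_g2p_alt (l ++ [x]) =
      l.map (fun t => if t = " " then "@SIL" else "@" ++ t) ++
        [if x = " " ∨ x = "SIL" then "@END" else "@" ++ x] := by
  simp [clean_g2p_alt, List.map_reverse]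

-- A's loop on l ++ [x], started at index i with total length i + (l ++ [x]).length,
-- computes the same map-then-end-token result.
theorem clean_g2p_go_concat (l : List String) (x : String) : ∀ i : Nat,
    clean_g2p_go i (i + (l ++ [x]).length) (l ++ [x]) =
      l.map (fun t => if t = " " then "@SIL" else "@" ++ t) ++
        [if x = " " ∨ x = "SIL" then "@END" else "@" ++ x] := by
  induction l with
  | nil =>
    intro i
    by_cases h1 : x = " "
    · simp [clean_g2p_go, h1]
    · by_cases h2 : x = "SIL" <;> simp [clean_g2p_go, h1, h2]
  | cons a l' ih =>
    intro i
    have hne : i ≠ i + (a :: (l' ++ [x])).length - 1 := by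
      simp only [List.length_cons, List.length_append]; omega
    have harg : i + (a :: (l' ++ [x])).length = (i + 1) + (l' ++ [x]).length := by
      simp only [List.length_cons, List.length_append]; omega
    rw [List.cons_append, clean_g2p_go, if_neg hne, harg, ih (i + 1)]
    by_cases h1 : a = " " <;> simp [h1]

-- ===== VERDICT (by name: the statement is the Claim_ definition above) =====
theorem clean_g2p_spec : Claim_equal_clean_g2p := by
  intro g2p_text _
  unfold Spec_clean_g2p clean_g2p
  induction g2p_text using List.reverseRecOn with
  | nil => rfl
  | append_singleton l x _ =>
    rw [clean_g2p_alt_concat]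
    have := clean_g2p_go_concat l x 0
    simpa using this
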